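-- pv_equiv track=rewrite | github.com/nosmokingsurfer/RL_hexapod | roboschool_folder/gym_nir_walkers.py | generate_phase_map
-- ===== SOURCE A (Python) =====
-- def generate_phase_map(gait_points):
--     phase = 0
--     ph_map = [phase]
--     pos = gait_points[0]
--     for i in range(1, len(gait_points), 1):
--         same = True
--         for j in range(len(gait_points[i])):
--             same = same and (gait_points[i][j] == gait_points[i-1][j])
--         if not same:
--             phase += 1
--         ph_map.append(phase)
--     return ph_map
-- ===== SOURCE B (Python) =====
-- def generate_phase_map(gait_points):
--     # per-step change indicators, then a running prefix sum
--     changes = [0] + [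
--         0 if all(c[j] == p[j] for j in range(len(c))) else 1
--         for p, c in zip(gait_points, gait_points[1:])
--     ]
--     total = 0
--     out = []
--     for ch in changes:
--         total += ch
--         out.append(total)
--     return out
-- ===== Notes on version B (the rewrite author's own statement) =====
-- stated objective: simpler
-- what changed: Replaces the indexed loop carrying (phase, map) state with a two-stage decomposition: a list of 0/1 change indicators per consecutive pair (via zip and a short-circuiting all), then a running prefix sum.
import Mathlib
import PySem

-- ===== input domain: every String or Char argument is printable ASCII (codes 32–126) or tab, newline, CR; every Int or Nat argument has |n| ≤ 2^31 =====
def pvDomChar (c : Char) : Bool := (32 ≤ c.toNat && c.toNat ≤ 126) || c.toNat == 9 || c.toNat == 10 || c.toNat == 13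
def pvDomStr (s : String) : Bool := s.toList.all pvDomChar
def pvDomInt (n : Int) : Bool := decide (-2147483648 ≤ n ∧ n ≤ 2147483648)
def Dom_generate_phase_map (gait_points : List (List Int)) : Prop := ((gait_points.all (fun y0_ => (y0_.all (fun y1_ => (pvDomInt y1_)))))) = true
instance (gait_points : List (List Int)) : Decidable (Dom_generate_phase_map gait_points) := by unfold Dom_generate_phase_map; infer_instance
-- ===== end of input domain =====

-- B replaces A's single indexed loop carrying (phase, map) state by a two-stage
-- decomposition: per-pair 0/1 change indicators, then a running prefix sum (objective: simpler).

-- ===== PORT A =====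
-- inner loop: same = same and (gait_points[i][j] == gait_points[i-1][j]); the pyGetD default 0
-- is only reached where Python raises IndexError (excluded by Pre_)
def pmSame (cur prev : List Int) : Bool :=
  (List.range cur.length).foldl
    (fun same (j : Nat) => same && (PySem.List.pyGetD cur (j : Int) 0 == PySem.List.pyGetD prev (j : Int) 0)) true

def pmStepA (gp : List (List Int)) (st : Int × List Int) (i : Int) : Int × List Int :=
  let same := pmSame (PySem.List.pyGetD gp i []) (PySem.List.pyGetD gp (i - 1) [])
  let phase := if !same then st.1 + 1 else st.1
  (phase, st.2 ++ [phase])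

-- A also binds pos = gait_points[0] (unused; IndexError on []): Pre_ excludes the empty list
def generate_phase_map (gait_points : List (List Int)) : List Int :=
  ((PySem.List.pyRange 1 (gait_points.length : Int) 1).foldl (pmStepA gait_points) (0, [0])).2

-- ===== PORT B =====
def pmChange (p c : List Int) : Int :=
  if (List.range c.length).all
      (fun (j : Nat) => PySem.List.pyGetD c (j : Int) 0 == PySem.List.pyGetD p (j : Int) 0) then 0 else 1

def pmAccStep (acc : Int × List Int) (ch : Int) : Int × List Int :=
  (acc.1 + ch, acc.2 ++ [acc.1 + ch])

def generate_phase_map_alt (gait_points : List (List Int)) : List Int :=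
  let changes := 0 :: (gait_points.zip (PySem.List.slice gait_points (some 1) none)).map
      (fun pc => pmChange pc.1 pc.2)
  (changes.foldl pmAccStep (0, [])).2

-- ===== PRECONDITION & SPEC =====
-- Pre_ excludes exactly the inputs where Python A raises IndexError: the empty list
-- (gait_points[0]) and consecutive pairs where row i is longer than row i-1 and agrees
-- with it on all of row i-1's indices (the inner loop then reads past row i-1's end).
def Pre_generate_phase_map (gait_points : List (List Int)) : Prop :=
  gait_points ≠ [] ∧
  ∀ pc ∈ gait_points.zip gait_points.tail,
    ¬(pc.1.length < pc.2.length ∧ pc.2.take pc.1.length = pc.1)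
instance (gait_points : List (List Int)) : Decidable (Pre_generate_phase_map gait_points) := by
  unfold Pre_generate_phase_map; infer_instance

def pvWitness_generate_phase_map : List (List Int) := [[1, 2], [1, 3], [1, 3]]

def Spec_generate_phase_map (gait_points : List (List Int)) (out : List Int) : Prop := out = generate_phase_map_alt gait_points
instance (gait_points : List (List Int)) (out : List Int) : Decidable (Spec_generate_phase_map gait_points out) := by unfold Spec_generate_phase_map; infer_instance

-- ===== CLAIM (what is proved, stated in full; the proofs are below) =====
def Claim_equal_generate_phase_map : Prop := ∀ (gait_points : List (List Int)), Dom_generate_phase_map gait_points → Pre_generate_phase_map gait_points → Spec_generate_phase_map gait_points (generate_phase_map gait_points)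

-- ===== LEMMAS AND PROOFS =====

-- the && fold computes List.all
theorem foldl_and_all (f : Nat → Bool) : ∀ (l : List Nat) (b : Bool),
    l.foldl (fun s j => s && f j) b = (b && l.all f)
  | [], b => by simp
  | a :: t, b => by
    rw [List.foldl_cons, foldl_and_all f t (b && f a), List.all_cons, Bool.and_assoc]

theorem pmSame_eq_all (cur prev : List Int) :
    pmSame cur prev = (List.range cur.length).all
      (fun (j : Nat) => PySem.List.pyGetD cur (j : Int) 0 == PySem.List.pyGetD prev (j : Int) 0) := by
  unfold pmSame
  rw [foldl_and_all, Bool.true_and]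

-- main invariant: A's indexed fold equals B's prefix-sum fold over the first k change indicators
theorem pm_loop_eq (gp : List (List Int)) (k : Nat) (hk : k + 1 ≤ gp.length) :
    (PySem.List.pyRange 1 ((k : Int) + 1) 1).foldl (pmStepA gp) (0, [0]) =
      ((0 : Int) :: ((gp.zip gp.tail).map (fun pc => pmChange pc.1 pc.2)).take k).foldl
        pmAccStep (0, []) := by
  induction k with
  | zero =>
    simp [PySem.List.pyRange_one_eq_nil (by norm_num : (1:Int) ≤ 1), pmAccStep]
  | succ k ih =>
    have hlen : k < ((gp.zip gp.tail).map (fun pc => pmChange pc.1 pc.2)).length := by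
      simp [List.length_zip]; omega
    have hk1 : k + 1 < gp.length := by omega
    have hrange : PySem.List.pyRange 1 ((k : Int) + 1 + 1) 1 =
        PySem.List.pyRange 1 ((k : Int) + 1) 1 ++ [(k : Int) + 1] := by
      exact PySem.List.pyRange_one_succ_right (by omega)
    have htake : ((gp.zip gp.tail).map (fun pc => pmChange pc.1 pc.2)).take (k + 1) =
        ((gp.zip gp.tail).map (fun pc => pmChange pc.1 pc.2)).take k ++
          [((gp.zip gp.tail).map (fun pc => pmChange pc.1 pc.2))[k]] := by
      rw [List.take_add_one, List.getElem?_eq_getElem hlen]; simp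
    have hc : ((gp.zip gp.tail).map (fun pc => pmChange pc.1 pc.2))[k] =
        pmChange gp[k] gp[k + 1] := by
      simp [List.getElem_zip, List.getElem_tail]
    have hcast : ((k : Int) + 1 + 1) = (((k + 1 : Nat) : Int) + 1) := by push_cast; ring
    rw [hcast] at hrange
    rw [hrange, List.foldl_append, ih (by omega), htake, hc]
    show pmStepA gp _ _ = (((0:Int) :: _) ++ [_]).foldl pmAccStep _
    rw [List.foldl_append]
    generalize (((0:Int) :: ((gp.zip gp.tail).map fun pc => pmChange pc.1 pc.2).take k).foldl pmAccStep (0, [])) = st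
    unfold pmStepA pmAccStep pmChange
    rw [show ((k : Int) + 1 - 1) = ((k : Nat) : Int) by push_cast; ring]
    rw [show ((k : Int) + 1) = (((k + 1 : Nat)) : Int) by norm_cast]
    rw [PySem.List.pyGetD_natCast, PySem.List.pyGetD_natCast,
        List.getD_eq_getElem _ _ (by omega : k + 1 < gp.length),
        List.getD_eq_getElem _ _ (by omega : k < gp.length), pmSame_eq_all]
    simp only [List.foldl_cons, List.foldl_nil]
    cases h : (List.range (gp[k+1]).length).all
        (fun (j : Nat) => PySem.List.pyGetD gp[k+1] (j : Int) 0 == PySem.List.pyGetD gp[k] (j : Int) 0)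
    · simp [h]
    · simp

-- ===== VERDICT (by name: the statement is the Claim_ definition above) =====
theorem generate_phase_map_spec : Claim_equal_generate_phase_map := by
  intro gp _ hpre
  unfold Spec_generate_phase_map generate_phase_map generate_phase_map_alt
  rw [PySem.List.slice_from_one]
  obtain ⟨hne, -⟩ := hpre
  have hlen : 1 ≤ gp.length := List.length_pos_iff.mpr hne
  obtain ⟨k, hk⟩ : ∃ k, gp.length = k + 1 := ⟨gp.length - 1, by omega⟩
  have := pm_loop_eq gp k (by omega)
  have htake : ((gp.zip gp.tail).map (fun pc => pmChange pc.1 pc.2)).take k =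
      (gp.zip gp.tail).map (fun pc => pmChange pc.1 pc.2) := by
    apply List.take_of_length_le; simp [List.length_zip]; omega
  rw [htake] at this
  rw [hk] at *
  have hcast : (((k + 1 : Nat) : Int)) = ((k : Int) + 1) := by push_cast; ring
  rw [hcast, this]
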